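-- pv_equiv track=rewrite | github.com/harurunrunrun/GPT-generated-Library | library/compress.py | parse_escaped_literal
-- ===== SOURCE A (Python) =====
-- def parse_escaped_literal(s: str, i: int, prefix: str):
--     j = i + len(prefix)
--     quote = prefix[-1]
--
--     while j < len(s):
--         if s[j] == "\\":
--             j += 2
--         elif s[j] == quote:
--             return j + 1
--         else:
--             j += 1
--
--     return len(s)
-- ===== SOURCE B (Python) =====
-- def parse_escaped_literal(s, i, prefix):
--     quote = prefix[-1]
--     n = len(s)
--     j = i + len(prefix)
--     while j < n:
--         b = s.find("\\", j)
--         q = s.find(quote, j)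
--         if q == -1:
--             return n
--         if b == -1 or q < b:
--             return q + 1
--         j = b + 2
--     return n
-- ===== Notes on version B (the rewrite author's own statement) =====
-- stated objective: alternative
-- what changed: A's character-by-character while loop (inspect s[j], step by 1 or 2) is replaced by a loop over str.find calls that jumps directly to the next backslash or next quote, doing one iteration per escape instead of per character.
-- outside the precondition, e.g. on parse_escaped_literal('xb', -3, 'x'): A returns -1, B returns 1
import Mathlib
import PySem

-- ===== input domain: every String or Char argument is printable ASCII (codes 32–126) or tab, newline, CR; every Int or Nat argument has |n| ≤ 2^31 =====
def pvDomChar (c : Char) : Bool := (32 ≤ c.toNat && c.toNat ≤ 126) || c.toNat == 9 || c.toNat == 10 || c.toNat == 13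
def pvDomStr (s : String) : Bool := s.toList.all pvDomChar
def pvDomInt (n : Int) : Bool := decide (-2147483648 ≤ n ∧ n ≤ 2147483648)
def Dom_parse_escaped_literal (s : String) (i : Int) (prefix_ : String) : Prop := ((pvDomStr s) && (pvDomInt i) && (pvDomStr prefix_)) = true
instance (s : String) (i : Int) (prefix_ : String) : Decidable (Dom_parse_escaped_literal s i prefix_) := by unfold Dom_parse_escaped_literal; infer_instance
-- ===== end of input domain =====

-- B replaces A's character-by-character while loop with a loop over str.find calls that jumps
-- directly to the next backslash / next quote (objective: alternative; one iteration per escape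
-- instead of per character, at similar measured cost).
-- Both loop ports carry a Nat fuel that only makes the recursion structural; the caller passes
-- enough fuel for every iteration the Python loop performs, so the fuel-exhausted arm is unreachable.

-- ===== PORT A =====
-- A's while loop: j steps by 1, or by 2 over an escape; returns j+1 at the closing quote, len(s) otherwise.
def pvGoA (l : List Char) (q : Char) : Nat → Int → Int
  | 0, _ => (l.length : Int)          -- unreachable with the fuel passed below
  | fuel + 1, j =>
    if j < (l.length : Int) then
      match PySem.List.pyGet? l j with
      | none => 0                      -- s[j] raises IndexError here (j < -len(s)); outside Pre_
      | some c =>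
        if c = '\\' then pvGoA l q fuel (j + 2)
        else if c = q then j + 1
        else pvGoA l q fuel (j + 1)
    else (l.length : Int)

def parse_escaped_literal (s : String) (i : Int) (prefix_ : String) : Int :=
  let j := i + (prefix_.toList.length : Int)
  match PySem.List.pyGet? prefix_.toList (-1) with
  | none => 0                          -- prefix[-1] raises IndexError on empty prefix; outside Pre_
  | some quote => pvGoA s.toList quote (((s.toList.length : Int) - j).toNat + 1) j

-- ===== PORT B =====
-- B's while loop: jump to the next backslash / next quote with str.find
def pvGoB (l : List Char) (q : Char) : Nat → Int → Int
  | 0, _ => (l.length : Int)          -- unreachable with the fuel passed below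
  | fuel + 1, j =>
    if j < (l.length : Int) then
      let b := PySem.Chars.findFrom l ['\\'] j none
      let qq := PySem.Chars.findFrom l [q] j none
      if qq = -1 then (l.length : Int)
      else if b = -1 ∨ qq < b then qq + 1
      else pvGoB l q fuel (b + 2)
    else (l.length : Int)

def parse_escaped_literal_alt (s : String) (i : Int) (prefix_ : String) : Int :=
  match PySem.List.pyGet? prefix_.toList (-1) with
  | none => 0                          -- prefix[-1] raises IndexError on empty prefix; outside Pre_
  | some quote =>
    let j := i + (prefix_.toList.length : Int)
    pvGoB s.toList quote (((s.toList.length : Int) - j).toNat + 1) j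

-- ===== PRECONDITION & SPEC =====
-- Pre_ excludes empty prefix (A raises IndexError on prefix[-1]), and calls whose start index
-- i + len(prefix) is negative: there A either raises IndexError (below -len(s)) or, via Python's
-- negative-index wraparound, rescans the string and can return a negative "end index" — a corner no
-- caller of a literal parser would specify, and B's find-based scan (str.find clamps a negative
-- start to 0) makes the other defensible choice there.
def Pre_parse_escaped_literal (s : String) (i : Int) (prefix_ : String) : Prop :=
  prefix_.toList ≠ [] ∧ 0 ≤ i + (prefix_.toList.length : Int)
instance (s : String) (i : Int) (prefix_ : String) : Decidable (Pre_parse_escaped_literal s i prefix_) := by unfold Pre_parse_escaped_literal; infer_instance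

def pvWitness_parse_escaped_literal : String × Int × String := ("a\\\"b\"c", 0, "r\"")

def Spec_parse_escaped_literal (s : String) (i : Int) (prefix_ : String) (out : Int) : Prop := out = parse_escaped_literal_alt s i prefix_
instance (s : String) (i : Int) (prefix_ : String) (out : Int) : Decidable (Spec_parse_escaped_literal s i prefix_ out) := by unfold Spec_parse_escaped_literal; infer_instance

-- ===== CLAIM (what is proved, stated in full; the proofs are below) =====
def Claim_equal_parse_escaped_literal : Prop := ∀ (s : String) (i : Int) (prefix_ : String), Dom_parse_escaped_literal s i prefix_ → Pre_parse_escaped_literal s i prefix_ → Spec_parse_escaped_literal s i prefix_ (parse_escaped_literal s i prefix_)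

-- ===== LEMMAS AND PROOFS =====

theorem pv_singleton_prefix (c : Char) (m : List Char) : [c] <+: m ↔ m.head? = some c := by
  cases m with
  | nil => simp
  | cons a t => simp [List.cons_prefix_cons, eq_comm]

theorem pv_prefix_drop (c : Char) (l : List Char) (i : Nat) : [c] <+: l.drop i ↔ l[i]? = some c := by
  rw [pv_singleton_prefix, List.head?_drop]

theorem pv_infix_drop (c : Char) (l : List Char) (i : Nat) :
    [c] <:+: l.drop i ↔ ∃ idx : Nat, i ≤ idx ∧ l[idx]? = some c := by
  constructor
  · intro h
    have hm : c ∈ l.drop i := h.mem (by simp)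
    obtain ⟨k, hk, he⟩ := List.getElem_of_mem hm
    have hk' : i + k < l.length := by simpa [Nat.lt_sub_iff_add_lt'] using hk
    refine ⟨i + k, by omega, ?_⟩
    rw [List.getElem_drop] at he
    rw [List.getElem?_eq_getElem hk', he]
  · rintro ⟨idx, hle, hget⟩
    have h1 : [c] <:+: l.drop idx := ((pv_prefix_drop c l idx).mpr hget).isInfix
    have hdd : l.drop idx = (l.drop i).drop (idx - i) := by
      rw [List.drop_drop]; congr 1; omega
    exact h1.trans (hdd ▸ (List.drop_suffix (idx - i) (l.drop i)).isInfix)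

theorem pvF_eq_neg_one (l : List Char) (c : Char) (k : Nat) (hk : k ≤ l.length) :
    PySem.Chars.findFrom l [c] (k : Int) none = -1 ↔ ∀ idx : Nat, k ≤ idx → l[idx]? ≠ some c := by
  rw [PySem.Chars.findFrom_natCast_eq_neg_one_iff l [c] k hk, pv_infix_drop]
  constructor
  · intro h idx hle hg; exact h ⟨idx, hle, hg⟩
  · rintro h ⟨idx, hle, hg⟩; exact h idx hle hg

theorem pvF_found (l : List Char) (c : Char) (k : Nat) (hk : k ≤ l.length)
    (h : PySem.Chars.findFrom l [c] (k : Int) none ≠ -1) :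
    (k : Int) ≤ PySem.Chars.findFrom l [c] (k : Int) none ∧
    l[(PySem.Chars.findFrom l [c] (k : Int) none).toNat]? = some c ∧
    ∀ i : Nat, k ≤ i → i < (PySem.Chars.findFrom l [c] (k : Int) none).toNat → l[i]? ≠ some c := by
  obtain ⟨h1, h2, h3⟩ := PySem.Chars.findFrom_natCast_spec l [c] k hk h
  exact ⟨h1, (pv_prefix_drop c l _).mp h2,
    fun i hi hlt hg => h3 i hi hlt ((pv_prefix_drop c l i).mpr hg)⟩

-- l[k] = c → the first occurrence of c at or after k is k itself
theorem pvF_first (l : List Char) (c : Char) (k : Nat) (hk : k < l.length)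
    (hc : l[k]? = some c) : PySem.Chars.findFrom l [c] (k : Int) none = (k : Int) := by
  have hne : PySem.Chars.findFrom l [c] (k : Int) none ≠ -1 := by
    intro h
    exact ((pvF_eq_neg_one l c k (by omega)).mp h) k (le_refl k) hc
  obtain ⟨h1, h2, h3⟩ := pvF_found l c k (by omega) hne
  by_cases hgt : k < (PySem.Chars.findFrom l [c] (k : Int) none).toNat
  · exact absurd hc (h3 k (le_refl k) hgt)
  · omega

-- l[k] ≠ c → searching from k and from k+1 agree
theorem pvF_step (l : List Char) (c : Char) (k : Nat) (hk : k < l.length)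
    (hc : l[k]? ≠ some c) :
    PySem.Chars.findFrom l [c] (k : Int) none = PySem.Chars.findFrom l [c] ((k : Int) + 1) none := by
  have hcast : ((k : Int) + 1) = ((k + 1 : Nat) : Int) := by push_cast; ring
  rw [hcast]
  by_cases h1 : PySem.Chars.findFrom l [c] ((k + 1 : Nat) : Int) none = -1
  · rw [h1, (pvF_eq_neg_one l c k (by omega)).mpr]
    intro idx hle hg
    rcases Nat.eq_or_lt_of_le hle with rfl | hlt
    · exact hc hg
    · exact ((pvF_eq_neg_one l c (k + 1) (by omega)).mp h1) idx (by omega) hg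
  · obtain ⟨a1, a2, a3⟩ := pvF_found l c (k + 1) (by omega) h1
    have h0 : PySem.Chars.findFrom l [c] (k : Int) none ≠ -1 := by
      intro h
      exact ((pvF_eq_neg_one l c k (by omega)).mp h) _ (by omega) a2
    obtain ⟨b1, b2, b3⟩ := pvF_found l c k (by omega) h0
    have hkne : (PySem.Chars.findFrom l [c] (k : Int) none).toNat ≠ k := by
      intro he; exact hc (he ▸ b2)
    have le1 : (PySem.Chars.findFrom l [c] ((k + 1 : Nat) : Int) none).toNat ≤
        (PySem.Chars.findFrom l [c] (k : Int) none).toNat := by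
      by_contra hgt
      exact a3 _ (by omega) (by omega) b2
    have le2 : (PySem.Chars.findFrom l [c] (k : Int) none).toNat ≤
        (PySem.Chars.findFrom l [c] ((k + 1 : Nat) : Int) none).toNat := by
      by_contra hgt
      exact b3 _ (by omega) (by omega) a2
    omega

-- a findFrom result that is not -1 is ≥ start - 1 (≥ start for a nonnegative start, ≥ 0 always)
theorem pvFindFrom_min (l sub : List Char) (j : Int)
    (h : PySem.Chars.findFrom l sub j none ≠ -1) :
    j - 1 ≤ PySem.Chars.findFrom l sub j none := by
  have hfind : ∀ m : List Char, PySem.Chars.find m sub ≠ -1 → 0 ≤ PySem.Chars.find m sub := by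
    intro m hm
    rcases lt_or_ge (PySem.Chars.find m sub) 0 with hlt | hge
    · have hni : ¬ sub <:+: m := fun hi =>
        absurd ((PySem.Chars.find_nonneg_iff m sub).mpr hi) (by omega)
      exact absurd ((PySem.Chars.find_eq_neg_one_iff m sub).mpr hni) hm
    · exact hge
  unfold PySem.Chars.findFrom at h ⊢
  dsimp only at h ⊢
  split_ifs at h ⊢ with h1 h2 h3 h4 h5 h6 h7 h8 <;>
    first
      | (exact absurd rfl h)
      | ((try have := hfind _ (by assumption)); omega)

-- if no quote occurs at or after k, A's loop returns len(s)
theorem pvGoA_no_quote (l : List Char) (q : Char) :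
    ∀ (fuel k : Nat), l.length < fuel + k → (∀ idx : Nat, k ≤ idx → l[idx]? ≠ some q) →
      pvGoA l q fuel (k : Int) = (l.length : Int) := by
  intro fuel
  induction fuel with
  | zero => intro k hf h; rfl
  | succ f ih =>
    intro k hf h
    by_cases hk : k < l.length
    · rw [pvGoA, if_pos (by exact_mod_cast hk)]
      rw [PySem.List.pyGet?_natCast, List.getElem?_eq_getElem hk]
      simp only
      split_ifs with hbs hq
      · have hc : ((k : Int) + 2) = ((k + 2 : Nat) : Int) := by push_cast; ring
        rw [hc]
        exact ih (k + 2) (by omega) (fun idx h2 => h idx (by omega))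
      · exact absurd (by rw [List.getElem?_eq_getElem hk, hq]) (h k le_rfl)
      · have hc : ((k : Int) + 1) = ((k + 1 : Nat) : Int) := by push_cast; ring
        rw [hc]
        exact ih (k + 1) (by omega) (fun idx h2 => h idx (by omega))
    · rw [pvGoA, if_neg (by exact_mod_cast hk)]

-- B's loop ignores the exact amount of fuel as long as it is sufficient
theorem pvGoB_fuel (l : List Char) (q : Char) :
    ∀ (f1 f2 : Nat) (j : Int), (l.length : Int) < f1 + j → (l.length : Int) < f2 + j →
      pvGoB l q f1 j = pvGoB l q f2 j := by
  intro f1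
  induction f1 with
  | zero =>
    intro f2 j h1 h2
    cases f2 with
    | zero => rfl
    | succ g => rw [pvGoB, pvGoB, if_neg (by push_cast at h1 ⊢; omega)]
  | succ f ih =>
    intro f2 j h1 h2
    cases f2 with
    | zero => rw [pvGoB, pvGoB, if_neg (by push_cast at h2 ⊢; omega)]
    | succ g =>
      by_cases hj : j < (l.length : Int)
      · rw [pvGoB, pvGoB, if_pos hj, if_pos hj]
        dsimp only
        by_cases hqq : PySem.Chars.findFrom l [q] j none = -1
        · rw [if_pos hqq, if_pos hqq]
        · rw [if_neg hqq, if_neg hqq]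
          by_cases hor : PySem.Chars.findFrom l ['\\'] j none = -1 ∨
              PySem.Chars.findFrom l [q] j none < PySem.Chars.findFrom l ['\\'] j none
          · rw [if_pos hor, if_pos hor]
          · rw [if_neg hor, if_neg hor]
            have hb := pvFindFrom_min l ['\\'] j (by tauto)
            exact ih g _ (by push_cast at h1 ⊢; omega) (by push_cast at h2 ⊢; omega)
      · rw [pvGoB, pvGoB, if_neg hj, if_neg hj]

-- B's loop does not notice an uninteresting character: start k and start k+1 agree
theorem pvGoB_step (l : List Char) (q : Char) (f : Nat) (k : Nat) (hk : k < l.length)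
    (hf : l.length < f + k + 1) (hbs : l[k] ≠ '\\') (hq : l[k] ≠ q) :
    pvGoB l q (f + 1) (k : Int) = pvGoB l q f ((k + 1 : Nat) : Int) := by
  have hget : l[k]? = some l[k] := List.getElem?_eq_getElem hk
  have e1 : PySem.Chars.findFrom l ['\\'] (k : Int) none =
      PySem.Chars.findFrom l ['\\'] ((k : Int) + 1) none :=
    pvF_step l '\\' k hk (by rw [hget]; simpa using hbs)
  have e2 : PySem.Chars.findFrom l [q] (k : Int) none =
      PySem.Chars.findFrom l [q] ((k : Int) + 1) none :=
    pvF_step l q k hk (by rw [hget]; simpa using hq)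
  have hcast : ((k : Int) + 1) = ((k + 1 : Nat) : Int) := by push_cast; ring
  obtain ⟨g, rfl⟩ : ∃ g, f = g + 1 := ⟨f - 1, by omega⟩
  by_cases hk1 : k + 1 < l.length
  · rw [pvGoB, if_pos (by exact_mod_cast hk : (k : Int) < (l.length : Int))]
    dsimp only
    simp only [e1, e2, hcast]
    conv_rhs => rw [pvGoB]
    rw [if_pos (by exact_mod_cast hk1 : ((k + 1 : Nat) : Int) < (l.length : Int))]
    dsimp only
    by_cases hqq : PySem.Chars.findFrom l [q] ((k + 1 : Nat) : Int) none = -1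
    · rw [if_pos hqq, if_pos hqq]
    · rw [if_neg hqq, if_neg hqq]
      by_cases hor : PySem.Chars.findFrom l ['\\'] ((k + 1 : Nat) : Int) none = -1 ∨
          PySem.Chars.findFrom l [q] ((k + 1 : Nat) : Int) none <
            PySem.Chars.findFrom l ['\\'] ((k + 1 : Nat) : Int) none
      · rw [if_pos hor, if_pos hor]
      · rw [if_neg hor, if_neg hor]
        have hb1 := (pvF_found l '\\' (k + 1) (by omega) (by tauto)).1
        refine pvGoB_fuel l q (g + 1) g _ (by push_cast at hb1 ⊢; omega) (by push_cast at hb1 ⊢; omega)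
  · have hq1 : PySem.Chars.findFrom l [q] ((k + 1 : Nat) : Int) none = -1 := by
      rw [pvF_eq_neg_one l q (k + 1) (by omega)]
      intro idx hle
      rw [List.getElem?_eq_none (by omega)]
      simp
    rw [pvGoB, if_pos (by exact_mod_cast hk : (k : Int) < (l.length : Int))]
    dsimp only
    simp only [e1, e2, hcast, hq1]
    rw [if_pos trivial]
    conv_rhs => rw [pvGoB]
    rw [if_neg (by exact_mod_cast hk1 : ¬ ((k + 1 : Nat) : Int) < (l.length : Int))]

-- the core equivalence: from any nonnegative start index, with sufficient fuel, the loops agree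
theorem pvMain (l : List Char) (q : Char) :
    ∀ (fuel k : Nat), l.length < fuel + k → pvGoA l q fuel (k : Int) = pvGoB l q fuel (k : Int) := by
  intro fuel
  induction fuel with
  | zero => intro k hf; rfl
  | succ f ih =>
    intro k hf
    by_cases hk : k < l.length
    · have hget : l[k]? = some l[k] := List.getElem?_eq_getElem hk
      rw [pvGoA, if_pos (by exact_mod_cast hk)]
      rw [PySem.List.pyGet?_natCast, hget]
      simp only
      by_cases hbs : l[k] = '\\'
      · rw [if_pos hbs]
        have hb : PySem.Chars.findFrom l ['\\'] (k : Int) none = (k : Int) :=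
          pvF_first l '\\' k hk (by rw [hget, hbs])
        rw [pvGoB, if_pos (by exact_mod_cast hk : (k : Int) < (l.length : Int))]
        dsimp only
        simp only [hb]
        by_cases hqq : PySem.Chars.findFrom l [q] (k : Int) none = -1
        · rw [if_pos hqq]
          have hno := (pvF_eq_neg_one l q k (by omega)).mp hqq
          have hc : ((k : Int) + 2) = ((k + 2 : Nat) : Int) := by push_cast; ring
          rw [hc]
          exact pvGoA_no_quote l q f (k + 2) (by omega) (fun idx h2 => hno idx (by omega))
        · have hq1 := (pvF_found l q k (by omega) hqq).1
          rw [if_neg hqq, if_neg (by rintro (h | h) <;> omega)]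
          have hc : ((k : Int) + 2) = ((k + 2 : Nat) : Int) := by push_cast; ring
          rw [hc]
          exact ih (k + 2) (by omega)
      · by_cases hq : l[k] = q
        · rw [if_neg hbs, if_pos hq]
          have hqf : PySem.Chars.findFrom l [q] (k : Int) none = (k : Int) :=
            pvF_first l q k hk (by rw [hget, hq])
          rw [pvGoB, if_pos (by exact_mod_cast hk : (k : Int) < (l.length : Int))]
          dsimp only
          simp only [hqf]
          rw [if_neg (by omega : ¬ ((k : Int) = -1))]
          have hcond : PySem.Chars.findFrom l ['\\'] (k : Int) none = -1 ∨
              (k : Int) < PySem.Chars.findFrom l ['\\'] (k : Int) none := by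
            by_cases hb : PySem.Chars.findFrom l ['\\'] (k : Int) none = -1
            · exact Or.inl hb
            · right
              obtain ⟨b1, b2, b3⟩ := pvF_found l '\\' k (by omega) hb
              have hnk : (PySem.Chars.findFrom l ['\\'] (k : Int) none).toNat ≠ k := by
                intro he
                rw [he, hget] at b2
                exact hbs (by injection b2)
              omega
          rw [if_pos hcond]
        · rw [if_neg hbs, if_neg hq]
          have hc : ((k : Int) + 1) = ((k + 1 : Nat) : Int) := by push_cast; ring
          rw [hc, ih (k + 1) (by omega), ← pvGoB_step l q f k hk (by omega) hbs hq]
    · rw [pvGoA, if_neg (by exact_mod_cast hk), pvGoB,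
        if_neg (by exact_mod_cast hk : ¬ (k : Int) < (l.length : Int))]

-- ===== VERDICT (by name: the statement is the Claim_ definition above) =====
theorem parse_escaped_literal_spec : Claim_equal_parse_escaped_literal := by
  intro s i prefix_ _hDom hPre
  obtain ⟨hne, hnn⟩ := hPre
  unfold Spec_parse_escaped_literal parse_escaped_literal parse_escaped_literal_alt
  rw [PySem.List.pyGet?_neg_one, List.getLast?_eq_some_getLast hne]
  dsimp only
  have hj : i + (prefix_.toList.length : Int) = (((i + prefix_.toList.length).toNat : Nat) : Int) := by
    omega
  rw [hj]
  exact pvMain _ _ _ _ (by omega)
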